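-- pv_equiv track=rewrite | github.com/frizynn/linkedin-cli | linkedin_cli/client.py | _urn_from_url
-- ===== SOURCE A (Python) =====
-- def _urn_from_url(url: str) -> str:
--     if "urn:li:activity:" in url:
--         for part in url.rstrip("/").split("/"):
--             if part.startswith("urn:li:activity:"):
--                 return part
--     for part in reversed([segment for segment in url.rstrip("/").split("/") if segment]):
--         if part.isdigit():
--             return f"urn:li:activity:{part}"
--     return ""
-- ===== SOURCE B (Python) =====
-- def _urn_from_url(url: str) -> str:
--     last_digit = None
--     for part in url.rstrip("/").split("/"):
--         if part.startswith("urn:li:activity:"):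
--             return part
--         if part.isdigit():
--             last_digit = part
--     return f"urn:li:activity:{last_digit}" if last_digit is not None else ""
-- ===== Notes on version B (the rewrite author's own statement) =====
-- stated objective: simpler
-- what changed: A's substring guard and two separate scans (a forward urn-prefix scan, then a reversed digit scan over the filtered segments) are replaced by one forward pass that returns a urn-prefixed segment immediately and otherwise keeps the most recent all-digit segment in an accumulator.
import Mathlib
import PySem

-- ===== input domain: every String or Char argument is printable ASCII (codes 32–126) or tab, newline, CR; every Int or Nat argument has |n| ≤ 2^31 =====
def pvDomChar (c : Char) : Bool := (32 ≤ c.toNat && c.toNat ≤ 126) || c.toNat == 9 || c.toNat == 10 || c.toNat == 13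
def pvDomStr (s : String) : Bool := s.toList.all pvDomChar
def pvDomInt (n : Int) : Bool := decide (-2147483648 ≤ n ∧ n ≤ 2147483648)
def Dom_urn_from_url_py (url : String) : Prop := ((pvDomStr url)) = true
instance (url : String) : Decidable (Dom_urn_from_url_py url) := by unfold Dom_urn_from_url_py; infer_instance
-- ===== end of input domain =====

-- B replaces A's substring guard plus two scans (forward urn scan, reversed digit scan over the
-- filtered segments) by ONE forward pass that carries the most recent digit segment in an
-- accumulator (objective: simpler).

-- exact port of str.rstrip("/") for the single strip character '/' (PySem.Chars.rstrip strips
-- whitespace only): drop the trailing '/' characters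
def rstripSlash (s : List Char) : List Char :=
  (s.reverse.dropWhile (fun c => c == '/')).reverse

-- ===== PORT A =====
-- A's first for-loop: return the first segment that starts with the urn prefix
def aUrnScan : List (List Char) → Option (List Char)
  | [] => none
  | p :: rest =>
      if PySem.Chars.startswith p "urn:li:activity:".toList then some p else aUrnScan rest

-- A's second for-loop: over the already-reversed nonempty segments, the first all-digit one
def aDigitScan : List (List Char) → Option (List Char)
  | [] => none
  | p :: rest => if PySem.Chars.strIsdigit p then some p else aDigitScan rest

def urn_from_url_py (url : String) : String :=
  match (if PySem.Chars.isIn "urn:li:activity:".toList url.toList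
         then aUrnScan (PySem.Chars.splitOn (rstripSlash url.toList) ['/'])
         else none) with
  | some p => String.ofList p
  | none =>
      match aDigitScan (((PySem.Chars.splitOn (rstripSlash url.toList) ['/']).filter
                          (fun q => !q.isEmpty)).reverse) with
      | some p => String.ofList ("urn:li:activity:".toList ++ p)
      | none => ""

-- ===== PORT B =====
-- B's single loop: return a urn segment at once, else remember the most recent digit segment
def bScan : List (List Char) → Option (List Char) → String
  | [], last =>
      match last with
      | some d => String.ofList ("urn:li:activity:".toList ++ d)
      | none => ""
  | p :: rest, last =>
      if PySem.Chars.startswith p "urn:li:activity:".toList then String.ofList p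
      else bScan rest (if PySem.Chars.strIsdigit p then some p else last)

def urn_from_url_py_alt (url : String) : String :=
  bScan (PySem.Chars.splitOn (rstripSlash url.toList) ['/']) none

-- ===== PRECONDITION & SPEC =====
def Spec_urn_from_url_py (url : String) (out : String) : Prop := out = urn_from_url_py_alt url
instance (url : String) (out : String) : Decidable (Spec_urn_from_url_py url out) := by unfold Spec_urn_from_url_py; infer_instance

-- ===== CLAIM (what is proved, stated in full; the proofs are below) =====
def Claim_equal_urn_from_url_py : Prop := ∀ (url : String), Dom_urn_from_url_py url → Spec_urn_from_url_py url (urn_from_url_py url)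

-- ===== LEMMAS AND PROOFS =====

-- the rstripped string is a prefix of the original
theorem rstripSlash_prefix (s : List Char) : rstripSlash s <+: s := by
  have h : s.reverse.dropWhile (fun c => c == '/') <:+ s.reverse := List.dropWhile_suffix _
  have h2 := (List.reverse_prefix (l₂ := s.reverse)).mpr h
  simpa [rstripSlash] using h2

-- invariant of CPython split's worker: every produced piece is an old acc entry, extends the
-- pending cur by a prefix of the remaining input, or is an infix of the remaining input
theorem splitOn_go_mem (sep : List Char) (fuel : Nat) :
    ∀ (l cur : List Char) (acc : List (List Char)) (p : List Char),
      p ∈ PySem.Chars.splitOn.go sep fuel l cur acc →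
      p ∈ acc ∨ (∃ m, p = cur.reverse ++ m ∧ m <+: l) ∨ p <:+: l := by
  induction fuel with
  | zero =>
      intro l cur acc p hp
      simp [PySem.Chars.splitOn.go] at hp
      rcases hp with hp | hp
      · exact Or.inl hp
      · exact Or.inr (Or.inl ⟨l, hp, List.prefix_refl l⟩)
  | succ fuel ih =>
      intro l cur acc p hp
      cases l with
      | nil =>
          simp [PySem.Chars.splitOn.go] at hp
          rcases hp with hp | hp
          · exact Or.inl hp
          · exact Or.inr (Or.inl ⟨[], by simp [hp], List.nil_prefix⟩)
      | cons c rest =>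
          rw [PySem.Chars.splitOn.go] at hp
          by_cases hsep : sep.isPrefixOf (c :: rest) = true
          · simp only [hsep, if_pos] at hp
            rcases ih _ _ _ _ hp with h | ⟨m, hm, hpre⟩ | hinf
            · rcases List.mem_cons.mp h with h | h
              · exact Or.inr (Or.inl ⟨[], by simp [h], List.nil_prefix⟩)
              · exact Or.inl h
            · refine Or.inr (Or.inr ?_)
              rw [hm]
              simp only [List.reverse_nil, List.nil_append]
              exact hpre.isInfix.trans (List.drop_suffix _ _).isInfix
            · exact Or.inr (Or.inr (hinf.trans (List.drop_suffix _ _).isInfix))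
          · simp only [hsep, if_neg, Bool.false_eq_true, not_false_iff] at hp
            rcases ih _ _ _ _ hp with h | ⟨m, hm, hpre⟩ | hinf
            · exact Or.inl h
            · refine Or.inr (Or.inl ⟨c :: m, ?_, ?_⟩)
              · simp [hm]
              · exact List.cons_prefix_cons.mpr ⟨rfl, hpre⟩
            · exact Or.inr (Or.inr (hinf.trans (List.suffix_cons c rest).isInfix))

-- a piece of split is an infix of the split string
theorem mem_splitOn_infix (s p : List Char) (sep : List Char)
    (hp : p ∈ PySem.Chars.splitOn s sep) : p <:+: s := by
  unfold PySem.Chars.splitOn at hp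
  rcases splitOn_go_mem sep (s.length + 1) s [] [] p hp with h | ⟨m, hm, hpre⟩ | hinf
  · simp at h
  · rw [hm]; simpa using hpre.isInfix
  · exact hinf

theorem aUrnScan_some {parts : List (List Char)} {p : List Char}
    (h : aUrnScan parts = some p) :
    p ∈ parts ∧ PySem.Chars.startswith p "urn:li:activity:".toList = true := by
  induction parts with
  | nil => simp [aUrnScan] at h
  | cons q rest ih =>
      rw [aUrnScan] at h
      by_cases hs : PySem.Chars.startswith q "urn:li:activity:".toList = true
      · simp only [hs, if_pos, Option.some.injEq] at h
        exact ⟨by simp [← h], h ▸ hs⟩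
      · simp only [hs, if_neg, Bool.false_eq_true, not_false_iff] at h
        exact ⟨List.mem_cons_of_mem _ (ih h).1, (ih h).2⟩

-- A's reversed digit scan, unfolded from the back: the LAST digit piece wins
theorem aDigitScan_append (l : List (List Char)) (p : List Char) :
    aDigitScan (l ++ [p]) =
      match aDigitScan l with
      | some q => some q
      | none => if PySem.Chars.strIsdigit p then some p else none := by
  induction l with
  | nil => simp [aDigitScan]
  | cons q rest ih =>
      by_cases hq : PySem.Chars.strIsdigit q = true
      · simp [aDigitScan, hq]
      · simp [aDigitScan, hq, ih]

-- the loop invariant: B's single pass computes A's two scans, the accumulator standing for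
-- the last digit segment already seen
theorem bScan_eq (parts : List (List Char)) (last : Option (List Char)) :
    bScan parts last =
      match aUrnScan parts with
      | some p => String.ofList p
      | none =>
          match aDigitScan ((parts.filter (fun q => !q.isEmpty)).reverse) with
          | some p => String.ofList ("urn:li:activity:".toList ++ p)
          | none =>
              match last with
              | some d => String.ofList ("urn:li:activity:".toList ++ d)
              | none => "" := by
  induction parts generalizing last with
  | nil => simp [bScan, aUrnScan, aDigitScan]
  | cons p rest ih =>
      by_cases hs : PySem.Chars.startswith p "urn:li:activity:".toList = true
      · rw [bScan, if_pos hs, aUrnScan, if_pos hs]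
      · rw [bScan, if_neg hs, aUrnScan, if_neg hs, ih]
        by_cases hne : p.isEmpty = true
        · have : PySem.Chars.strIsdigit p = false := by
            simp [PySem.Chars.strIsdigit, hne]
          simp [this, hne]
        · simp only [List.filter_cons, hne, Bool.not_false, if_pos, List.reverse_cons,
            aDigitScan_append]
          cases haU : aUrnScan rest with
          | some q => rfl
          | none =>
              cases haD : aDigitScan ((rest.filter (fun q => !q.isEmpty)).reverse) with
              | some q => rfl
              | none =>
                  by_cases hd : PySem.Chars.strIsdigit p = true
                  · simp [hd]
                  · simp [hd]

-- ===== VERDICT (by name: the statement is the Claim_ definition above) =====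
theorem urn_from_url_py_spec : Claim_equal_urn_from_url_py := by
  intro url _
  unfold Spec_urn_from_url_py
  unfold urn_from_url_py urn_from_url_py_alt
  rw [bScan_eq]
  cases h : aUrnScan (PySem.Chars.splitOn (rstripSlash url.toList) ['/']) with
  | none => rw [ite_self]
  | some p =>
      obtain ⟨hmem, hsw⟩ := aUrnScan_some h
      have hpfx : "urn:li:activity:".toList <+: p := (PySem.Chars.startswith_iff _ _).mp hsw
      have hinf : p <:+: url.toList :=
        (mem_splitOn_infix _ p _ hmem).trans (rstripSlash_prefix url.toList).isInfix
      have hi : PySem.Chars.isIn "urn:li:activity:".toList url.toList = true :=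
        (PySem.Chars.isIn_iff_infix _ _).mpr (hpfx.isInfix.trans hinf)
      rw [if_pos hi]
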